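-- pv_equiv track=rewrite | github.com/pypi-data/pypi-mirror-400 | packages/quran-transcript/quran_transcript-0.1.2-py3-none-any.whl/quran_transcript/tasmeea.py | merge_text
-- ===== SOURCE A (Python) =====
-- def compute_prefix_function(pattern):
--     pi = [0] * len(pattern)
--     k = 0
--     for q in range(1, len(pattern)):
--         while k > 0 and pattern[k] != pattern[q]:
--             k = pi[k - 1]
--         if pattern[k] == pattern[q]:
--             k += 1
--         pi[q] = k
--     return pi
--
-- def merge_text(texts: list[str]) -> str:
--     if not texts:
--         return ""
--     merged = texts[0]
--     for i in range(1, len(texts)):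
--         next_text = texts[i]
--         L = min(len(merged), len(next_text))
--         s_tail = merged[-L:]
--         pi = compute_prefix_function(next_text)
--         state = 0  # number of matched chars
--         for char in s_tail:
--             # going batch to tha last matching prefix
--             while state > 0 and next_text[state] != char:
--                 state = pi[state - 1]
--             if next_text[state] == char:
--                 state += 1
--         # if state < min_merge_chars:
--         #     raise SmallTarteelOverlap("Very Small overlap to merge on")
--         merged += next_text[state:]
--     return merged
-- ===== SOURCE B (Python) =====
-- def merge_text(texts: list[str]) -> str:
--     if not texts:
--         return ""
--     merged = texts[0]
--     for nxt in texts[1:]: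
--         k = 0
--         for j in range(min(len(merged), len(nxt)), 0, -1):
--             if merged[-j:] == nxt[:j]:
--                 k = j
--                 break
--         merged += nxt[k:]
--     return merged
-- ===== Notes on version B (the rewrite author's own statement) =====
-- stated objective: simpler
-- what changed: Replaced the KMP prefix-function automaton with a direct scan that tries overlap lengths from the maximum down and takes the first (hence largest) match, dropping the helper entirely; Pre_ excludes exactly the inputs where A raises IndexError (a later text equal to "" while the accumulated merge is nonempty, because merged[-0:] is the whole string and the empty pattern is then indexed).
import Mathlib
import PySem

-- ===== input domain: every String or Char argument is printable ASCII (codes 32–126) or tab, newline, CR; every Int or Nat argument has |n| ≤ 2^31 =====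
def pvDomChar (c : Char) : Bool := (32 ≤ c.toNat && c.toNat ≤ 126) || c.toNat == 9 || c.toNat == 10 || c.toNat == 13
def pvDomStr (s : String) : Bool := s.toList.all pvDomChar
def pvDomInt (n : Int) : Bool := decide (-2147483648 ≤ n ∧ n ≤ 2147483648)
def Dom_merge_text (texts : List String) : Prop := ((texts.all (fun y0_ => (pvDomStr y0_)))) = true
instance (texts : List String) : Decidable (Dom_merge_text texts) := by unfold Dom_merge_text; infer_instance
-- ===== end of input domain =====

-- B replaces A's KMP prefix-function overlap computation by a direct scan that tries
-- overlap lengths from the largest down and keeps the first match (objective: simpler).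


-- ===== PORT A =====
-- the 'while k > 0 and pattern[k] != char: k = pi[k-1]' loop; fuel bounds the number of
-- iterations (each iteration strictly decreases k, so fuel := k is always enough)
def pvFall (pat : List Char) (pi : List Nat) (c : Char) : Nat → Nat → Nat
  | 0, k => k
  | fuel + 1, k =>
      if k ≠ 0 ∧ pat.getD k ' ' ≠ c then pvFall pat pi c fuel (pi.getD (k - 1) 0) else k

-- one iteration of the body of compute_prefix_function's for-loop
def pvPiF (pat : List Char) (st : List Nat × Nat) (q : Nat) : List Nat × Nat :=
  let k0 := pvFall pat st.1 (pat.getD q ' ') st.2 st.2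
  let k1 := if pat.getD k0 ' ' = pat.getD q ' ' then k0 + 1 else k0
  (st.1.set q k1, k1)

-- compute_prefix_function(pattern)
def pvComputePi (pat : List Char) : List Nat :=
  ((List.range' 1 (pat.length - 1)).foldl (pvPiF pat) (List.replicate pat.length 0, 0)).1

-- body of 'for char in s_tail' (fall back, then advance on a match)
def pvKmpStep (pat : List Char) (pi : List Nat) (s : Nat) (c : Char) : Nat :=
  let s' := pvFall pat pi c s s
  if pat.getD s' ' ' = c then s' + 1 else s'

def pvKmpRun (pat : List Char) (pi : List Nat) (tl : List Char) : Nat :=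
  tl.foldl (pvKmpStep pat pi) 0

-- one iteration of merge_text's outer loop; merged[-L:] is the Python negative slice
def pvMergeStepA (m nx : List Char) : List Char :=
  let L := min m.length nx.length
  let tl := PySem.List.slice m (some (-(L : Int))) none
  let s := pvKmpRun nx (pvComputePi nx) tl
  m ++ nx.drop s

def merge_text (texts : List String) : String :=
  match texts with
  | [] => ""
  | t :: rest => String.ofList (rest.foldl (fun m nx => pvMergeStepA m nx.toList) t.toList)

-- ===== PORT B =====
-- 'for j in range(L, 0, -1): if merged[-j:] == nxt[:j]: k = j; break' (k = 0 if no match)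
def pvScan (m p : List Char) : Nat → Nat
  | 0 => 0
  | j + 1 => if m.drop (m.length - (j + 1)) = p.take (j + 1) then j + 1 else pvScan m p j

def pvMergeStepB (m p : List Char) : List Char :=
  let k := pvScan m p (min m.length p.length)
  m ++ p.drop k

def merge_text_alt (texts : List String) : String :=
  match texts with
  | [] => ""
  | t :: rest => String.ofList (rest.foldl (fun m nx => pvMergeStepB m nx.toList) t.toList)

-- ===== PRECONDITION & SPEC =====
-- Pre_ excludes exactly the inputs where A raises IndexError: a later text equal to ""
-- while some earlier text is nonempty (merged[-0:] is the whole string and the empty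
-- pattern is then indexed).
def Pre_merge_text (texts : List String) : Prop :=
  texts.Pairwise (fun a b => a ≠ "" → b ≠ "")
instance (texts : List String) : Decidable (Pre_merge_text texts) := by
  unfold Pre_merge_text; infer_instance
def pvWitness_merge_text : List String := ["abc", "cd"]

def Spec_merge_text (texts : List String) (out : String) : Prop := out = merge_text_alt texts
instance (texts : List String) (out : String) : Decidable (Spec_merge_text texts out) := by
  unfold Spec_merge_text; infer_instance

-- ===== CLAIM (what is proved, stated in full; the proofs are below) =====
def Claim_equal_merge_text : Prop :=
  ∀ (texts : List String), Dom_merge_text texts → Pre_merge_text texts →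
    Spec_merge_text texts (merge_text texts)

-- ===== LEMMAS AND PROOFS =====
-- longest border (proper prefix = suffix) of pat.take s
def pvBrd (pat : List Char) (s : Nat) : Nat :=
  Nat.findGreatest (fun k => pat.take k <:+ pat.take s) (s - 1)

-- longest prefix of pat that is a suffix of t (meaningful when t.length ≤ pat.length)
def pvLps (pat t : List Char) : Nat :=
  Nat.findGreatest (fun k => pat.take k <:+ t) t.length

lemma pvFall_succ (pat : List Char) (pi : List Nat) (c : Char) (fuel k : Nat) :
    pvFall pat pi c (fuel + 1) k =
      if k ≠ 0 ∧ pat.getD k ' ' ≠ c then pvFall pat pi c fuel (pi.getD (k - 1) 0) else k := rfl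

lemma pv_take_succ (pat : List Char) (k : Nat) (h : k < pat.length) :
    pat.take (k + 1) = pat.take k ++ [pat.getD k ' '] := by
  rw [List.take_add_one, List.getD_eq_getElem?_getD, List.getElem?_eq_getElem h]; rfl

lemma pv_snoc_suffix (a t : List Char) (x c : Char) :
    (a ++ [x] <:+ t ++ [c]) ↔ (a <:+ t ∧ x = c) := by
  constructor
  · rintro ⟨u, hu⟩
    have hx : x = c := by
      have := congrArg (fun l => List.getLast? l) hu
      simpa using this
    subst hx
    refine ⟨⟨u, ?_⟩, rfl⟩
    have := List.append_cancel_right (as := u ++ a) (bs := [x]) (cs := t) ?_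
    · simpa [List.append_assoc] using this
    · simpa [List.append_assoc] using hu
  · rintro ⟨⟨u, hu⟩, rfl⟩
    exact ⟨u, by simp [hu.symm]⟩

lemma pv_ext (pat t : List Char) (c : Char) (k : Nat) (h : k < pat.length) :
    (pat.take (k + 1) <:+ t ++ [c]) ↔ (pat.take k <:+ t ∧ pat.getD k ' ' = c) := by
  rw [pv_take_succ pat k h, pv_snoc_suffix]

lemma pv_nest (pat t : List Char) (j s : Nat) (hjs : j ≤ s)
    (hj : pat.take j <:+ t) (hs : pat.take s <:+ t) :
    pat.take j <:+ pat.take s := by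
  refine List.suffix_of_suffix_length_le hj hs ?_
  simp only [List.length_take]
  omega

lemma pv_findGreatest_congr (P Q : Nat → Prop) [DecidablePred P] [DecidablePred Q]
    (n : Nat) (h : ∀ k, k ≤ n → (P k ↔ Q k)) :
    Nat.findGreatest P n = Nat.findGreatest Q n := by
  induction n with
  | zero => rfl
  | succ n ih =>
      rw [Nat.findGreatest_succ, Nat.findGreatest_succ,
        if_congr (h _ le_rfl) rfl (ih (fun k hk => h k (le_trans hk (Nat.le_succ n))))]

lemma pv_findGreatest_shrink (P Q : Nat → Prop) [DecidablePred P] [DecidablePred Q]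
    (n m : Nat) (hmn : m ≤ n)
    (h1 : ∀ k, k ≤ n → P k → (k ≤ m ∧ Q k)) (h2 : ∀ k, k ≤ m → Q k → P k) :
    Nat.findGreatest P n = Nat.findGreatest Q m := by
  have hP := (Nat.findGreatest_eq_iff (P := P) (k := n)).mp rfl
  have hQ := (Nat.findGreatest_eq_iff (P := Q) (k := m)).mp rfl
  apply le_antisymm
  · rcases Nat.eq_zero_or_pos (Nat.findGreatest P n) with h0 | h0
    · omega
    · have hPr := hP.2.1 (by omega)
      obtain ⟨hle, hQr⟩ := h1 _ hP.1 hPr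
      exact Nat.le_findGreatest hle hQr
  · rcases Nat.eq_zero_or_pos (Nat.findGreatest Q m) with h0 | h0
    · omega
    · have hQr := hQ.2.1 (by omega)
      exact Nat.le_findGreatest (le_trans hQ.1 hmn) (h2 _ hQ.1 hQr)

lemma pv_brd_suffix (pat : List Char) (s : Nat) :
    pat.take (pvBrd pat s) <:+ pat.take s := by
  unfold pvBrd
  rcases Nat.eq_zero_or_pos
    (Nat.findGreatest (fun k => pat.take k <:+ pat.take s) (s - 1)) with h0 | h0
  · rw [h0]; simp
  · have := (Nat.findGreatest_eq_iff
      (P := fun k => pat.take k <:+ pat.take s) (k := s - 1)).mp rfl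
    exact this.2.1 (by omega)

lemma pv_brd_le (pat : List Char) (s : Nat) : pvBrd pat s ≤ s - 1 :=
  Nat.findGreatest_le _

lemma pv_lps_suffix (pat t : List Char) : pat.take (pvLps pat t) <:+ t := by
  unfold pvLps
  rcases Nat.eq_zero_or_pos
    (Nat.findGreatest (fun k => pat.take k <:+ t) t.length) with h0 | h0
  · rw [h0]; simp
  · have := (Nat.findGreatest_eq_iff
      (P := fun k => pat.take k <:+ t) (k := t.length)).mp rfl
    exact this.2.1 (by omega)

lemma pv_fall_spec (pat : List Char) (pi : List Nat) (c : Char) (B : Nat)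
    (hpi : ∀ i, i < B → pi.getD i 0 = pvBrd pat (i + 1)) :
    ∀ fuel s, s ≤ fuel → s ≤ B → s < pat.length →
      pvFall pat pi c fuel s =
        Nat.findGreatest
          (fun k => pat.take k <:+ pat.take s ∧ (k = 0 ∨ pat.getD k ' ' = c)) s := by
  intro fuel
  induction fuel with
  | zero =>
      intro s hs _ _
      have : s = 0 := by omega
      subst this
      rfl
  | succ fuel ih =>
      intro s hs hsB hsl
      by_cases h0 : s = 0
      · subst h0
        rw [pvFall_succ, if_neg (fun h => h.1 rfl)]
        rfl
      · by_cases hc : pat.getD s ' ' = c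
        · have hret : pvFall pat pi c (fuel + 1) s = s := by
            rw [pvFall_succ, if_neg (fun h => h.2 hc)]
          rw [hret]
          symm
          apply Nat.findGreatest_eq_iff.mpr
          exact ⟨le_rfl, fun _ => ⟨List.suffix_refl _, Or.inr hc⟩, fun k hk1 hk2 _ => by omega⟩
        · have hrec : pvFall pat pi c (fuel + 1) s = pvFall pat pi c fuel (pi.getD (s - 1) 0) := by
            rw [pvFall_succ, if_pos ⟨h0, hc⟩]
          have hk'eq : pi.getD (s - 1) 0 = pvBrd pat s := by
            have := hpi (s - 1) (by omega)
            rwa [Nat.sub_add_cancel (by omega : 1 ≤ s)] at this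
          have hk'le : pi.getD (s - 1) 0 ≤ s - 1 := by rw [hk'eq]; exact pv_brd_le pat s
          have hbsuf : pat.take (pi.getD (s - 1) 0) <:+ pat.take s := by
            rw [hk'eq]; exact pv_brd_suffix pat s
          rw [hrec, ih (pi.getD (s - 1) 0) (by omega) (by omega) (by omega)]
          symm
          apply pv_findGreatest_shrink _ _ s (pi.getD (s - 1) 0) (by omega)
          · intro k hk hPk
            obtain ⟨hsuf, hor⟩ := hPk
            rcases Nat.eq_zero_or_pos k with hz | hz
            · subst hz
              exact ⟨Nat.zero_le _, by simp, Or.inl rfl⟩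
            · have hck : pat.getD k ' ' = c := by rcases hor with h | h; omega; exact h
              have hks : k ≠ s := fun he => hc (he ▸ hck)
              have hkb : k ≤ pvBrd pat s := Nat.le_findGreatest (by omega) hsuf
              rw [← hk'eq] at hkb
              exact ⟨hkb, pv_nest pat (pat.take s) k _ hkb hsuf hbsuf, Or.inr hck⟩
          · intro k hk hQk
            exact ⟨hQk.1.trans hbsuf, hQk.2⟩

lemma pv_step_spec (pat : List Char) (pi : List Nat) (c : Char) (B : Nat)
    (hpi : ∀ i, i < B → pi.getD i 0 = pvBrd pat (i + 1))
    (t : List Char) (s cap : Nat)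
    (hscap : s ≤ cap) (hcap : cap + 1 ≤ pat.length) (hsB : s ≤ B)
    (hs : pat.take s <:+ t) (hmax : ∀ k, k ≤ cap → pat.take k <:+ t → k ≤ s) :
    pvKmpStep pat pi s c =
      Nat.findGreatest (fun k => pat.take k <:+ t ++ [c]) (cap + 1) := by
  have hfall := pv_fall_spec pat pi c B hpi s s le_rfl hsB (by omega)
  simp only [pvKmpStep, hfall]
  set f := Nat.findGreatest
    (fun k => pat.take k <:+ pat.take s ∧ (k = 0 ∨ pat.getD k ' ' = c)) s with hf
  have hiff := (Nat.findGreatest_eq_iff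
    (P := fun k => pat.take k <:+ pat.take s ∧ (k = 0 ∨ pat.getD k ' ' = c))
    (k := s)).mp hf.symm
  have hfle : f ≤ s := hiff.1
  have hfsuft : pat.take f <:+ t := by
    rcases Nat.eq_zero_or_pos f with hz | hz
    · rw [hz]; simp
    · exact (hiff.2.1 (by omega)).1.trans hs
  by_cases hc : pat.getD f ' ' = c
  · rw [if_pos hc]
    symm
    apply Nat.findGreatest_eq_iff.mpr
    refine ⟨by omega, fun _ => (pv_ext pat t c f (by omega)).mpr ⟨hfsuft, hc⟩, ?_⟩
    intro k hk1 hk2 hPk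
    obtain ⟨j, rfl⟩ : ∃ j, k = j + 1 := ⟨k - 1, by omega⟩
    have hj := (pv_ext pat t c j (by omega)).mp hPk
    have hjs : j ≤ s := hmax j (by omega) hj.1
    have : j ≤ f := Nat.le_findGreatest hjs ⟨pv_nest pat t j s hjs hj.1 hs, Or.inr hj.2⟩
    omega
  · have hf0 : f = 0 := by
      by_contra h0
      rcases (hiff.2.1 h0).2 with h | h
      · exact h0 h
      · exact hc h
    rw [if_neg hc, hf0]
    symm
    apply Nat.findGreatest_eq_iff.mpr
    refine ⟨Nat.zero_le _, fun h => absurd rfl h, ?_⟩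
    intro k hk1 hk2 hPk
    obtain ⟨j, rfl⟩ : ∃ j, k = j + 1 := ⟨k - 1, by omega⟩
    have hj := (pv_ext pat t c j (by omega)).mp hPk
    have hjs : j ≤ s := hmax j (by omega) hj.1
    have hjf : j ≤ f := Nat.le_findGreatest hjs ⟨pv_nest pat t j s hjs hj.1 hs, Or.inr hj.2⟩
    have hj0 : j = 0 := by omega
    subst hj0
    exact hc (by rw [hf0]; exact hj.2)

lemma pv_pi_inv (pat : List Char) (j : Nat) (hj : j + 1 ≤ pat.length) :
    ((List.range' 1 j).foldl (pvPiF pat) (List.replicate pat.length 0, 0)).1.length = pat.length ∧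
    ((List.range' 1 j).foldl (pvPiF pat) (List.replicate pat.length 0, 0)).2 = pvBrd pat (j + 1) ∧
    (∀ i, i ≤ j →
      ((List.range' 1 j).foldl (pvPiF pat) (List.replicate pat.length 0, 0)).1.getD i 0 =
        pvBrd pat (i + 1)) := by
  induction j with
  | zero =>
      refine ⟨by simp, rfl, ?_⟩
      intro i hi
      have hi0 : i = 0 := by omega
      subst hi0
      have hpos : 0 < pat.length := by omega
      rw [show List.range' 1 0 = ([] : List Nat) from rfl, List.foldl_nil,
        List.getD_eq_getElem?_getD, List.getElem?_replicate, if_pos hpos]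
      rfl
  | succ j ih =>
      obtain ⟨ihlen, ihk, ihtab⟩ := ih (by omega)
      set st := (List.range' 1 j).foldl (pvPiF pat) (List.replicate pat.length 0, 0) with hst
      have hfold : (List.range' 1 (j + 1)).foldl (pvPiF pat) (List.replicate pat.length 0, 0) =
          pvPiF pat st (1 + j) := by
        rw [List.range'_concat, List.foldl_append, List.foldl_cons, List.foldl_nil, one_mul]
      have hq : 1 + j = j + 1 := by omega
      have hFF : pvPiF pat st (j + 1) =
          (st.1.set (j + 1) (pvKmpStep pat st.1 st.2 (pat.getD (j + 1) ' ')),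
           pvKmpStep pat st.1 st.2 (pat.getD (j + 1) ' ')) := rfl
      have hstep := pv_step_spec pat st.1 (pat.getD (j + 1) ' ') (j + 1)
        (fun i hi => ihtab i (by omega))
        (pat.take (j + 1)) st.2 j
        (by rw [ihk]; exact le_trans (pv_brd_le pat (j + 1)) (by omega))
        (by omega)
        (by rw [ihk]; exact le_trans (pv_brd_le pat (j + 1)) (by omega))
        (by rw [ihk]; exact pv_brd_suffix pat (j + 1))
        (fun k hk hsuf => by rw [ihk]; exact Nat.le_findGreatest (by omega) hsuf)
      have htake : pat.take (j + 1) ++ [pat.getD (j + 1) ' '] = pat.take (j + 2) :=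
        (pv_take_succ pat (j + 1) (by omega)).symm
      have hknew : pvKmpStep pat st.1 st.2 (pat.getD (j + 1) ' ') = pvBrd pat (j + 2) := by
        rw [hstep, htake]; rfl
      rw [hfold, hq, hFF]
      refine ⟨by simpa using ihlen, by simpa using hknew, ?_⟩
      intro i hi
      simp only [List.getD_eq_getElem?_getD, List.getElem?_set]
      by_cases hij : j + 1 = i
      · subst hij
        rw [if_pos rfl, if_pos (by omega : j + 1 < st.1.length)]
        simpa using hknew
      · rw [if_neg hij]
        have := ihtab i (by omega)
        rwa [List.getD_eq_getElem?_getD] at this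

lemma pv_pi_spec (pat : List Char) :
    ∀ i, i < pat.length → (pvComputePi pat).getD i 0 = pvBrd pat (i + 1) := by
  intro i hi
  unfold pvComputePi
  obtain ⟨_, _, htab⟩ := pv_pi_inv pat (pat.length - 1) (by omega)
  exact htab i (by omega)

lemma pv_run_inv (pat : List Char) (pi : List Nat)
    (hpi : ∀ i, i < pat.length → pi.getD i 0 = pvBrd pat (i + 1)) :
    ∀ (l t : List Char), t.length + l.length ≤ pat.length →
      l.foldl (pvKmpStep pat pi) (pvLps pat t) = pvLps pat (t ++ l) := by
  intro l
  induction l with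
  | nil => intro t _; simp
  | cons c l ih =>
      intro t h
      simp only [List.length_cons] at h
      rw [List.foldl_cons]
      have hstep := pv_step_spec pat pi c pat.length hpi t (pvLps pat t) t.length
        (Nat.findGreatest_le _) (by omega)
        (le_trans (Nat.findGreatest_le _) (by omega))
        (pv_lps_suffix pat t)
        (fun k hk hs => Nat.le_findGreatest hk hs)
      rw [hstep]
      have hlps : Nat.findGreatest (fun k => pat.take k <:+ t ++ [c]) (t.length + 1) =
          pvLps pat (t ++ [c]) := by
        unfold pvLps; rw [List.length_append, List.length_cons, List.length_nil]
      rw [hlps, ih (t ++ [c]) (by simp; omega)]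
      simp

lemma pv_run_spec (pat tl : List Char) (h : tl.length ≤ pat.length) :
    pvKmpRun pat (pvComputePi pat) tl = pvLps pat tl := by
  unfold pvKmpRun
  have := pv_run_inv pat (pvComputePi pat) (pv_pi_spec pat) tl [] (by simpa)
  simpa using this

lemma pv_scan_eq (m p : List Char) (n : Nat) :
    pvScan m p n = Nat.findGreatest (fun j => m.drop (m.length - j) = p.take j) n := by
  induction n with
  | zero => rfl
  | succ n ih => rw [Nat.findGreatest_succ]; simp only [pvScan, ih]

lemma pv_stepAB (m p : List Char) (h : m = [] ∨ p ≠ []) :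
    pvMergeStepA m p = pvMergeStepB m p := by
  by_cases hm : m = []
  · subst hm
    simp [pvMergeStepA, pvMergeStepB, pvKmpRun, pvScan, PySem.List.slice_some_none]
  · have hp : p ≠ [] := by rcases h with h | h; exact absurd h hm; exact h
    simp only [pvMergeStepA, pvMergeStepB]
    have hL1 : 1 ≤ min m.length p.length := by
      have h1 : 0 < m.length := List.length_pos_iff.mpr hm
      have h2 : 0 < p.length := List.length_pos_iff.mpr hp
      omega
    have hLm : min m.length p.length ≤ m.length := Nat.min_le_left _ _
    have hLp : min m.length p.length ≤ p.length := Nat.min_le_right _ _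
    have htl : PySem.List.slice m (some (-((min m.length p.length : Nat) : Int))) none =
        m.drop (m.length - min m.length p.length) := by
      rw [PySem.List.slice_some_none, PySem.List.clampIdx_neg_natCast _ _ hL1]
    have htllen : (m.drop (m.length - min m.length p.length)).length = min m.length p.length := by
      simp; omega
    rw [htl, pv_run_spec p _ (by rw [htllen]; exact hLp), pv_scan_eq]
    have hmain : pvLps p (m.drop (m.length - min m.length p.length)) =
        Nat.findGreatest (fun j => m.drop (m.length - j) = p.take j) (min m.length p.length) := by
      unfold pvLps
      rw [htllen]
      apply pv_findGreatest_congr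
      intro k hk
      have hlenk : (p.take k).length = k := by simp; omega
      have hdd : (m.drop (m.length - min m.length p.length)).drop (min m.length p.length - k) =
          m.drop (m.length - k) := by
        rw [List.drop_drop]; congr 1; omega
      rw [List.suffix_iff_eq_drop, hlenk, htllen, hdd]
      exact eq_comm
    rw [hmain]

lemma pv_fold (rest : List String) : ∀ (m : List Char),
    (∀ x ∈ rest, m ≠ [] → x ≠ "") →
    rest.Pairwise (fun a b => a ≠ "" → b ≠ "") →
    rest.foldl (fun m nx => pvMergeStepA m nx.toList) m =
      rest.foldl (fun m nx => pvMergeStepB m nx.toList) m := by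
  induction rest with
  | nil => intro m _ _; rfl
  | cons x rest ih =>
      intro m h0 hpw
      rw [List.pairwise_cons] at hpw
      obtain ⟨hx, hrest⟩ := hpw
      rw [List.foldl_cons, List.foldl_cons]
      have hstep : pvMergeStepA m x.toList = pvMergeStepB m x.toList := by
        apply pv_stepAB
        by_cases hmz : m = []
        · exact Or.inl hmz
        · right
          intro hnil
          have hx0 : x = "" := by
            have := congrArg String.ofList hnil
            rwa [String.ofList_toList] at this
          exact h0 x (by simp) hmz hx0
      rw [hstep]
      apply ih
      · intro y hy hm'
        by_cases hxe : x = ""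
        · have hid : pvMergeStepB m x.toList = m := by
            subst hxe; simp [pvMergeStepB, pvScan]
          rw [hid] at hm'
          exact h0 y (by simp [hy]) hm'
        · exact hx y hy hxe
      · exact hrest

-- ===== VERDICT (by name: the statement is the Claim_ definition above) =====
theorem merge_text_spec : Claim_equal_merge_text := by
  unfold Claim_equal_merge_text
  intro texts _ hpre
  cases texts with
  | nil => rfl
  | cons t rest =>
      unfold Spec_merge_text merge_text merge_text_alt
      unfold Pre_merge_text at hpre
      rw [List.pairwise_cons] at hpre
      obtain ⟨ht, hrest⟩ := hpre
      have := pv_fold rest t.toList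
        (fun x hx hm => ht x hx (fun he => hm (by rw [he]; rfl))) hrest
      show String.ofList (rest.foldl (fun m nx => pvMergeStepA m nx.toList) t.toList) =
        String.ofList (rest.foldl (fun m nx => pvMergeStepB m nx.toList) t.toList)
      rw [this]
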